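-- pv_equiv track=rewrite | github.com/wilbowma/calendrino | calendrino_render.py | mergecaldatas
-- ===== SOURCE A (Python) =====
-- def mergecaldatas(percaldata):
-- 	data = {}
-- 	for newdata in percaldata:
-- 		# nestedly add this data to the structure
-- 		for y, months in newdata.items():
-- 			if y not in data: data[y] = {}
-- 			for m, days in months.items():
-- 				if m not in data[y]: data[y][m] = {}
-- 				for d, daydata in days.items():
-- 					if d not in data[y][m]: data[y][m][d] = ([],[]) # alldayers, timers
-- 					data[y][m][d][0].extend(daydata[0])
-- 					data[y][m][d][1].extend(daydata[1])
-- 	return data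
-- ===== SOURCE B (Python) =====
-- def _merge_days(dst, src):
--     out = dict(dst)
--     for d, (alldayers, timers) in src.items():
--         if d in out:
--             out[d] = (out[d][0] + alldayers, out[d][1] + timers)
--         else:
--             out[d] = (list(alldayers), list(timers))
--     return out
--
-- def _merge_months(dst, src):
--     out = dict(dst)
--     for m, days in src.items():
--         out[m] = _merge_days(out.get(m, {}), days)
--     return out
--
-- def _merge_years(dst, src):
--     out = dict(dst)
--     for y, months in src.items():
--         out[y] = _merge_months(out.get(y, {}), months)
--     return out
--
-- def mergecaldatas(percaldata):
--     data = {}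
--     for newdata in percaldata:
--         data = _merge_years(data, newdata)
--     return data
-- ===== Notes on version B (the rewrite author's own statement) =====
-- stated objective: alternative
-- what changed: B replaces A's single quadruple-nested loop that mutates one nested dict in place (membership test + in-place list extend at each level) with three small functional per-level merge helpers (_merge_years/_merge_months/_merge_days) that each return a fresh merged dict, combined by folding over percaldata.
import Mathlib
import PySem

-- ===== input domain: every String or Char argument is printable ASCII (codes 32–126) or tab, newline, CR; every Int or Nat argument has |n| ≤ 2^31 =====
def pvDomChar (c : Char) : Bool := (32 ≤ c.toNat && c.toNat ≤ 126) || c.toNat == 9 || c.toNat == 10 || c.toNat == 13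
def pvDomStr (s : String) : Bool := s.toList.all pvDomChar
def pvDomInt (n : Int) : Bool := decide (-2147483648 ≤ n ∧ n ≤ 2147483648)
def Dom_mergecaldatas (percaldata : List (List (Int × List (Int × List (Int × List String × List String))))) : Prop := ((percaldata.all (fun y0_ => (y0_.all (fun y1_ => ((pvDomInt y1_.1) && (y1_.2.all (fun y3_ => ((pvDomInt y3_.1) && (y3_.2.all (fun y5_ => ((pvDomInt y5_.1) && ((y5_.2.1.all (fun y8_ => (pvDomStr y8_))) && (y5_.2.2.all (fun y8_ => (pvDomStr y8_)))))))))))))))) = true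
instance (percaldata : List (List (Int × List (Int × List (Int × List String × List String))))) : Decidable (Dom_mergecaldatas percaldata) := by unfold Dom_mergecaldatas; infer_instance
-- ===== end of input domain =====

-- B replaces A's quadruple-nested in-place-mutating loop with three functional per-level
-- merge helpers returning fresh dicts; objective: alternative decomposition (same cost).
-- Dicts are ported as association lists in insertion order; the helpers below are exact for
-- Python dict lookup (first match), `d[k] = v` (overwrite keeps position, new keys append)
-- and in-place mutation of `d[k]` (first match), which is all both programs use.

-- ===== PORT A =====
-- d.get-style first-match lookup
def pvAGet? {β : Type} (l : List (Int × β)) (k : Int) : Option β :=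
  match l with
  | [] => none
  | (k', v) :: t => if k' = k then some v else pvAGet? t k

-- Python `d[k] = v`: overwrite in place, new keys append
def pvASet {β : Type} (l : List (Int × β)) (k : Int) (v : β) : List (Int × β) :=
  match l with
  | [] => [(k, v)]
  | (k', v') :: t => if k' = k then (k, v) :: t else (k', v') :: pvASet t k v

-- in-place mutation of the value stored at k (used only when k is present)
def pvAMod {β : Type} (l : List (Int × β)) (k : Int) (f : β → β) : List (Int × β) :=
  match l with
  | [] => []
  | (k', v) :: t => if k' = k then (k', f v) :: t else (k', v) :: pvAMod t k f

def mergecaldatas (percaldata : List (List (Int × List (Int × List (Int × List String × List String))))) : List (Int × List (Int × List (Int × List String × List String))) :=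
  percaldata.foldl (fun data newdata =>
    newdata.foldl (fun data ym =>
      let y := ym.1
      -- if y not in data: data[y] = {}
      let data := if (pvAGet? data y).isSome then data else pvASet data y []
      ym.2.foldl (fun data mm =>
        let m := mm.1
        -- if m not in data[y]: data[y][m] = {}
        let data := if (pvAGet? ((pvAGet? data y).getD []) m).isSome then data
                    else pvAMod data y (fun mo => pvASet mo m [])
        mm.2.foldl (fun data dd =>
          let d := dd.1
          let daydata := dd.2
          -- if d not in data[y][m]: data[y][m][d] = ([],[])
          let data := if (pvAGet? ((pvAGet? ((pvAGet? data y).getD []) m).getD []) d).isSome then data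
                      else pvAMod data y (fun mo => pvAMod mo m (fun da => pvASet da d ([], [])))
          -- data[y][m][d][0].extend(daydata[0])
          let data := pvAMod data y (fun mo => pvAMod mo m (fun da => pvAMod da d (fun p => (p.1 ++ daydata.1, p.2))))
          -- data[y][m][d][1].extend(daydata[1])
          pvAMod data y (fun mo => pvAMod mo m (fun da => pvAMod da d (fun p => (p.1, p.2 ++ daydata.2))))
        ) data
      ) data
    ) data
  ) []

-- ===== PORT B =====
def pvBMergeDays (dst src : List (Int × (List String × List String))) : List (Int × (List String × List String)) :=
  src.foldl (fun out dd =>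
    match pvAGet? out dd.1 with
    | some p => pvASet out dd.1 (p.1 ++ dd.2.1, p.2 ++ dd.2.2)
    | none => pvASet out dd.1 (dd.2.1, dd.2.2)) dst

def pvBMergeMonths (dst src : List (Int × List (Int × (List String × List String)))) : List (Int × List (Int × (List String × List String))) :=
  src.foldl (fun out mm =>
    pvASet out mm.1 (pvBMergeDays ((pvAGet? out mm.1).getD []) mm.2)) dst

def pvBMergeYears (dst src : List (Int × List (Int × List (Int × List String × List String)))) : List (Int × List (Int × List (Int × List String × List String))) :=
  src.foldl (fun out ym =>
    pvASet out ym.1 (pvBMergeMonths ((pvAGet? out ym.1).getD []) ym.2)) dst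

def mergecaldatas_alt (percaldata : List (List (Int × List (Int × List (Int × List String × List String))))) : List (Int × List (Int × List (Int × List String × List String))) :=
  percaldata.foldl (fun data newdata => pvBMergeYears data newdata) []

-- ===== PRECONDITION & SPEC =====
def Spec_mergecaldatas (percaldata : List (List (Int × List (Int × List (Int × List String × List String))))) (out : List (Int × List (Int × List (Int × List String × List String)))) : Prop := out = mergecaldatas_alt percaldata
instance (percaldata : List (List (Int × List (Int × List (Int × List String × List String))))) (out : List (Int × List (Int × List (Int × List String × List String)))) : Decidable (Spec_mergecaldatas percaldata out) := by
  unfold Spec_mergecaldatas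
  haveI h1 : DecidableEq (List (Int × List String × List String)) := inferInstance
  haveI h2 : DecidableEq (List (Int × List (Int × List String × List String))) := inferInstance
  haveI h3 : DecidableEq (List (Int × List (Int × List (Int × List String × List String)))) := inferInstance
  exact h3 _ _

-- ===== CLAIM (what is proved, stated in full; the proofs are below) =====
def Claim_equal_mergecaldatas : Prop := ∀ (percaldata : List (List (Int × List (Int × List (Int × List String × List String))))), Dom_mergecaldatas percaldata → Spec_mergecaldatas percaldata (mergecaldatas percaldata)

-- ===== LEMMAS AND PROOFS =====

theorem pvAGet?_set_self {β : Type} (l : List (Int × β)) (k : Int) (v : β) :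
    pvAGet? (pvASet l k v) k = some v := by
  induction l with
  | nil => simp [pvASet, pvAGet?]
  | cons h t ih =>
    by_cases hk : h.1 = k <;> simp [pvASet, pvAGet?, hk, ih]

theorem pvASet_set_self {β : Type} (l : List (Int × β)) (k : Int) (v w : β) :
    pvASet (pvASet l k v) k w = pvASet l k w := by
  induction l with
  | nil => simp [pvASet]
  | cons h t ih =>
    by_cases hk : h.1 = k <;> simp [pvASet, hk, ih]

theorem pvAMod_eq_set {β : Type} (l : List (Int × β)) (k : Int) (f : β → β) (v : β)
    (h : pvAGet? l k = some v) : pvAMod l k f = pvASet l k (f v) := by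
  induction l with
  | nil => simp [pvAGet?] at h
  | cons hd t ih =>
    obtain ⟨k', v'⟩ := hd
    by_cases hk : k' = k
    · subst hk
      simp [pvAGet?] at h
      simp [pvAMod, pvASet, h]
    · simp [pvAGet?, hk] at h
      simp [pvAMod, pvASet, hk, ih h]

-- the value Python's `if d in out:`/`else` day-level update leaves at key d
def pvBDayStep (da : List (Int × (List String × List String))) (dd : Int × (List String × List String)) :
    List (Int × (List String × List String)) :=
  match pvAGet? da dd.1 with
  | some p => pvASet da dd.1 (p.1 ++ dd.2.1, p.2 ++ dd.2.2)
  | none => pvASet da dd.1 (dd.2.1, dd.2.2)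

theorem pvASet_get_self {β : Type} (l : List (Int × β)) (k : Int) (v : β)
    (h : pvAGet? l k = some v) : pvASet l k v = l := by
  induction l with
  | nil => simp [pvAGet?] at h
  | cons hd t ih =>
    obtain ⟨k', v'⟩ := hd
    by_cases hk : k' = k
    · subst hk
      simp [pvAGet?] at h
      simp [pvASet, h]
    · simp [pvAGet?, hk] at h
      simp [pvASet, hk, ih h]

theorem pvDayStepEq (data : List (Int × List (Int × List (Int × List String × List String))))
    (y m : Int) (mo : List (Int × List (Int × List String × List String)))
    (da : List (Int × (List String × List String)))
    (hy : pvAGet? data y = some mo) (hm : pvAGet? mo m = some da)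
    (dd : Int × (List String × List String)) :
    (let d := dd.1
     let daydata := dd.2
     let data := if (pvAGet? ((pvAGet? ((pvAGet? data y).getD []) m).getD []) d).isSome then data
                 else pvAMod data y (fun mo => pvAMod mo m (fun da => pvASet da d ([], [])))
     let data := pvAMod data y (fun mo => pvAMod mo m (fun da => pvAMod da d (fun p => (p.1 ++ daydata.1, p.2))))
     pvAMod data y (fun mo => pvAMod mo m (fun da => pvAMod da d (fun p => (p.1, p.2 ++ daydata.2)))))
    = pvASet data y (pvASet mo m (pvBDayStep da dd)) := by
  simp only [hy, hm, Option.getD_some]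
  by_cases hd : (pvAGet? da dd.1).isSome
  · obtain ⟨p, hp⟩ := Option.isSome_iff_exists.mp hd
    simp only [hd, if_true]
    rw [pvAMod_eq_set data y _ mo hy, pvAMod_eq_set mo m _ da hm,
        pvAMod_eq_set da dd.1 _ p hp]
    rw [pvAMod_eq_set _ y _ _ (pvAGet?_set_self ..), pvAMod_eq_set _ m _ _ (pvAGet?_set_self ..),
        pvAMod_eq_set _ dd.1 _ _ (pvAGet?_set_self ..)]
    rw [pvASet_set_self, pvASet_set_self, pvASet_set_self]
    simp [pvBDayStep, hp]
  · simp only [hd, if_false, Bool.false_eq_true]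
    rw [pvAMod_eq_set data y _ mo hy, pvAMod_eq_set mo m _ da hm]
    rw [pvAMod_eq_set _ y _ _ (pvAGet?_set_self ..), pvAMod_eq_set _ m _ _ (pvAGet?_set_self ..),
        pvAMod_eq_set _ dd.1 _ _ (pvAGet?_set_self ..)]
    rw [pvAMod_eq_set _ y _ _ (pvAGet?_set_self ..), pvAMod_eq_set _ m _ _ (pvAGet?_set_self ..),
        pvAMod_eq_set _ dd.1 _ _ (pvAGet?_set_self ..)]
    rw [pvASet_set_self, pvASet_set_self, pvASet_set_self,
        pvASet_set_self, pvASet_set_self, pvASet_set_self]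
    have hnone : pvAGet? da dd.1 = none := Option.not_isSome_iff_eq_none.mp (by simpa using hd)
    simp [pvBDayStep, hnone]

theorem pvDayLoopEq (days : List (Int × (List String × List String)))
    (data : List (Int × List (Int × List (Int × List String × List String))))
    (y m : Int) (mo : List (Int × List (Int × List String × List String)))
    (da : List (Int × (List String × List String)))
    (hy : pvAGet? data y = some mo) (hm : pvAGet? mo m = some da) :
    days.foldl (fun data dd =>
      let d := dd.1
      let daydata := dd.2
      let data := if (pvAGet? ((pvAGet? ((pvAGet? data y).getD []) m).getD []) d).isSome then data
                  else pvAMod data y (fun mo => pvAMod mo m (fun da => pvASet da d ([], [])))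
      let data := pvAMod data y (fun mo => pvAMod mo m (fun da => pvAMod da d (fun p => (p.1 ++ daydata.1, p.2))))
      pvAMod data y (fun mo => pvAMod mo m (fun da => pvAMod da d (fun p => (p.1, p.2 ++ daydata.2))))) data
    = pvASet data y (pvASet mo m (pvBMergeDays da days)) := by
  induction days generalizing data mo da with
  | nil =>
    simp only [List.foldl_nil, pvBMergeDays, List.foldl_nil]
    rw [pvASet_get_self mo m da hm, pvASet_get_self data y mo hy]
  | cons dd rest ih =>
    rw [List.foldl_cons]
    rw [pvDayStepEq data y m mo da hy hm dd]
    rw [ih (pvASet data y (pvASet mo m (pvBDayStep da dd))) (pvASet mo m (pvBDayStep da dd))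
          (pvBDayStep da dd) (pvAGet?_set_self ..) (pvAGet?_set_self ..)]
    rw [pvASet_set_self, pvASet_set_self]
    rfl

theorem pvMonthLoopEq (months : List (Int × List (Int × (List String × List String))))
    (data : List (Int × List (Int × List (Int × List String × List String))))
    (y : Int) (mo : List (Int × List (Int × List String × List String)))
    (hy : pvAGet? data y = some mo) :
    months.foldl (fun data mm =>
      let m := mm.1
      let data := if (pvAGet? ((pvAGet? data y).getD []) m).isSome then data
                  else pvAMod data y (fun mo => pvASet mo m [])
      mm.2.foldl (fun data dd =>
        let d := dd.1
        let daydata := dd.2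
        let data := if (pvAGet? ((pvAGet? ((pvAGet? data y).getD []) m).getD []) d).isSome then data
                    else pvAMod data y (fun mo => pvAMod mo m (fun da => pvASet da d ([], [])))
        let data := pvAMod data y (fun mo => pvAMod mo m (fun da => pvAMod da d (fun p => (p.1 ++ daydata.1, p.2))))
        pvAMod data y (fun mo => pvAMod mo m (fun da => pvAMod da d (fun p => (p.1, p.2 ++ daydata.2))))) data) data
    = pvASet data y (pvBMergeMonths mo months) := by
  induction months generalizing data mo with
  | nil =>
    simp only [List.foldl_nil, pvBMergeMonths, List.foldl_nil]
    rw [pvASet_get_self data y mo hy]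
  | cons mm rest ih =>
    rw [List.foldl_cons]
    simp only [hy, Option.getD_some]
    by_cases hm : (pvAGet? mo mm.1).isSome
    · obtain ⟨da, hda⟩ := Option.isSome_iff_exists.mp hm
      simp only [hm, if_true]
      rw [pvDayLoopEq mm.2 data y mm.1 mo da hy hda]
      rw [ih (pvASet data y (pvASet mo mm.1 (pvBMergeDays da mm.2)))
            (pvASet mo mm.1 (pvBMergeDays da mm.2)) (pvAGet?_set_self ..)]
      rw [pvASet_set_self]
      simp [pvBMergeMonths, hda]
    · have hnone : pvAGet? mo mm.1 = none := Option.not_isSome_iff_eq_none.mp (by simpa using hm)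
      simp only [hm, if_false, Bool.false_eq_true]
      rw [pvAMod_eq_set data y _ mo hy]
      rw [pvDayLoopEq mm.2 _ y mm.1 (pvASet mo mm.1 []) [] (pvAGet?_set_self ..) (pvAGet?_set_self ..)]
      rw [pvASet_set_self, pvASet_set_self]
      rw [ih (pvASet data y (pvASet mo mm.1 (pvBMergeDays [] mm.2)))
            (pvASet mo mm.1 (pvBMergeDays [] mm.2)) (pvAGet?_set_self ..)]
      rw [pvASet_set_self]
      simp [pvBMergeMonths, hnone]

theorem pvYearStepEq (data : List (Int × List (Int × List (Int × List String × List String))))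
    (ym : Int × List (Int × List (Int × (List String × List String)))) :
    (let y := ym.1
     let data := if (pvAGet? data y).isSome then data else pvASet data y []
     ym.2.foldl (fun data mm =>
       let m := mm.1
       let data := if (pvAGet? ((pvAGet? data y).getD []) m).isSome then data
                   else pvAMod data y (fun mo => pvASet mo m [])
       mm.2.foldl (fun data dd =>
         let d := dd.1
         let daydata := dd.2
         let data := if (pvAGet? ((pvAGet? ((pvAGet? data y).getD []) m).getD []) d).isSome then data
                     else pvAMod data y (fun mo => pvAMod mo m (fun da => pvASet da d ([], [])))
         let data := pvAMod data y (fun mo => pvAMod mo m (fun da => pvAMod da d (fun p => (p.1 ++ daydata.1, p.2))))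
         pvAMod data y (fun mo => pvAMod mo m (fun da => pvAMod da d (fun p => (p.1, p.2 ++ daydata.2))))) data) data)
    = pvASet data ym.1 (pvBMergeMonths ((pvAGet? data ym.1).getD []) ym.2) := by
  by_cases hy : (pvAGet? data ym.1).isSome
  · obtain ⟨mo, hmo⟩ := Option.isSome_iff_exists.mp hy
    simp only [hy, if_true]
    rw [pvMonthLoopEq ym.2 data ym.1 mo hmo, hmo]
    rfl
  · have hnone : pvAGet? data ym.1 = none := Option.not_isSome_iff_eq_none.mp (by simpa using hy)
    simp only [hy, if_false, Bool.false_eq_true]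
    rw [pvMonthLoopEq ym.2 (pvASet data ym.1 []) ym.1 [] (pvAGet?_set_self ..)]
    rw [pvASet_set_self, hnone]
    rfl

-- ===== VERDICT (by name: the statement is the Claim_ definition above) =====
theorem mergecaldatas_spec : Claim_equal_mergecaldatas := by
  intro percaldata _
  unfold Spec_mergecaldatas mergecaldatas mergecaldatas_alt
  congr 1
  funext data newdata
  unfold pvBMergeYears
  congr 1
  funext data ym
  exact pvYearStepEq data ym
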